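-- pv_equiv track=rewrite | github.com/MysterionRise/ctf-dangerzone | zigzag.py | is_valid_permutation
-- ===== SOURCE A (Python) =====
-- def is_valid_permutation(perm):
--     n = len(perm)
--     for i in range(2, n + 1):
--         if i % 2 == 0:
--             # i is even, a[i-1] should be > a[i]
--             if perm[i - 2] < perm[i - 1]:
--                 return False
--         else:
--             # i is odd, a[i-1] should be < a[i]
--             if perm[i - 2] > perm[i - 1]:
--                 return False
--     return True
-- ===== SOURCE B (Python) =====
-- def is_valid_permutation(perm):
--     n = len(perm)
--     peaks = all(perm[i] >= perm[i + 1] for i in range(0, n - 1, 2))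
--     valleys = all(perm[i] <= perm[i + 1] for i in range(1, n - 1, 2))
--     return peaks and valleys
-- ===== Notes on version B (the rewrite author's own statement) =====
-- stated objective: idiomatic
-- what changed: Replaces the single interleaved loop with a parity branch by two separate stride-2 passes: one pass checks every even-index pair is non-ascending, a second pass checks every odd-index pair is non-descending.
import Mathlib
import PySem

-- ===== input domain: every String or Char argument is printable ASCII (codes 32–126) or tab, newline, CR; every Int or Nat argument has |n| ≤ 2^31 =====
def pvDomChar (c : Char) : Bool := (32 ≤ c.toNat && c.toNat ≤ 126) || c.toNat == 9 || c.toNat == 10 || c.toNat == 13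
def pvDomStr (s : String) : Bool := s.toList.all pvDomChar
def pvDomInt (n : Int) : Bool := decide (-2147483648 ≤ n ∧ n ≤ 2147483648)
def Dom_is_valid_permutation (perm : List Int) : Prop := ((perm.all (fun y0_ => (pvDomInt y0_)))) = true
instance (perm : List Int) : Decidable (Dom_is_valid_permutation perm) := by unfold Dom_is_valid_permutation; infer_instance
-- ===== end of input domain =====

-- B replaces A's single interleaved loop (parity branch inside) by two separate stride-2 passes
-- (even-index pairs non-ascending, odd-index pairs non-descending); objective: idiomatic.


-- ===== PORT A =====
-- the loop 'for i in range(2, n + 1)' with its two early 'return False' branches;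
-- perm[i-2], perm[i-1] are always in range (2 ≤ i ≤ n), so pyGetD's default is never read
def loopA (perm : List Int) : List Int → Bool
  | [] => true
  | i :: rest =>
    if PySem.Int.mod i 2 == 0 then
      if PySem.List.pyGetD perm (i - 2) 0 < PySem.List.pyGetD perm (i - 1) 0 then false
      else loopA perm rest
    else
      if PySem.List.pyGetD perm (i - 2) 0 > PySem.List.pyGetD perm (i - 1) 0 then false
      else loopA perm rest

def is_valid_permutation (perm : List Int) : Bool :=
  loopA perm (PySem.List.pyRange 2 ((perm.length : Int) + 1) 1)

-- ===== PORT B =====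
def is_valid_permutation_alt (perm : List Int) : Bool :=
  let n : Int := perm.length
  let peaks := (PySem.List.pyRange 0 (n - 1) 2).all
    (fun i => decide (PySem.List.pyGetD perm i 0 ≥ PySem.List.pyGetD perm (i + 1) 0))
  let valleys := (PySem.List.pyRange 1 (n - 1) 2).all
    (fun i => decide (PySem.List.pyGetD perm i 0 ≤ PySem.List.pyGetD perm (i + 1) 0))
  peaks && valleys

-- ===== PRECONDITION & SPEC =====
def Spec_is_valid_permutation (perm : List Int) (out : Bool) : Prop := out = is_valid_permutation_alt perm
instance (perm : List Int) (out : Bool) : Decidable (Spec_is_valid_permutation perm out) := by unfold Spec_is_valid_permutation; infer_instance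

-- ===== CLAIM (what is proved, stated in full; the proofs are below) =====
def Claim_equal_is_valid_permutation : Prop := ∀ (perm : List Int), Dom_is_valid_permutation perm → Spec_is_valid_permutation perm (is_valid_permutation perm)

-- ===== LEMMAS AND PROOFS =====

-- the body of A's loop as a predicate on the index
def fA (perm : List Int) (i : Int) : Bool :=
  if PySem.Int.mod i 2 == 0 then
    !decide (PySem.List.pyGetD perm (i - 2) 0 < PySem.List.pyGetD perm (i - 1) 0)
  else
    !decide (PySem.List.pyGetD perm (i - 2) 0 > PySem.List.pyGetD perm (i - 1) 0)

theorem loopA_eq_all (perm : List Int) (is : List Int) :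
    loopA perm is = is.all (fA perm) := by
  induction is with
  | nil => rfl
  | cons i rest ih =>
    simp only [loopA, List.all_cons, fA]
    split_ifs <;> simp_all

theorem main_eq (perm : List Int) :
    is_valid_permutation perm = is_valid_permutation_alt perm := by
  rw [Bool.eq_iff_iff]
  unfold is_valid_permutation is_valid_permutation_alt
  rw [loopA_eq_all]
  simp only [List.all_eq_true, Bool.and_eq_true,
    PySem.List.mem_pyRange_one,
    PySem.List.mem_pyRange_iff_of_pos (by norm_num : (0:Int) < 2)]
  constructor
  · intro hA
    constructor
    · intro i hi
      have := hA (i + 2) ⟨by omega, by omega⟩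
      simp only [fA] at this
      have hev : PySem.Int.mod (i + 2) 2 == 0 := by
        simp [beq_iff_eq]; omega
      rw [if_pos hev] at this
      simpa [show i + 2 - 2 = i by ring, show i + 2 - 1 = i + 1 by ring] using this
    · intro i hi
      have := hA (i + 2) ⟨by omega, by omega⟩
      simp only [fA] at this
      have hod : ¬ (PySem.Int.mod (i + 2) 2 == 0) := by
        simp [beq_iff_eq]; omega
      rw [if_neg hod] at this
      simpa [show i + 2 - 2 = i by ring, show i + 2 - 1 = i + 1 by ring] using this
  · rintro ⟨hpk, hvl⟩ i hi
    simp only [fA]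
    by_cases hev : (2 : Int) ∣ i
    · have h0 : PySem.Int.mod i 2 == 0 := by
        simp [beq_iff_eq]; omega
      rw [if_pos h0]
      have := hpk (i - 2) ⟨by omega, by omega, by omega⟩
      simpa [show i - 2 + 1 = i - 1 by ring] using this
    · have h0 : ¬ (PySem.Int.mod i 2 == 0) := by
        simp [beq_iff_eq]; omega
      rw [if_neg h0]
      have := hvl (i - 2) ⟨by omega, by omega, by omega⟩
      simpa [show i - 2 + 1 = i - 1 by ring] using this

-- ===== VERDICT (by name: the statement is the Claim_ definition above) =====
theorem is_valid_permutation_spec : Claim_equal_is_valid_permutation := by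
  intro perm _
  unfold Spec_is_valid_permutation
  exact main_eq perm
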